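-- pv_equiv track=rewrite | github.com/dpolonia/202511-Gravidas | scripts/01b_generate_personas.py | extract_physical_activity_level
-- ===== SOURCE A (Python) =====
-- def extract_physical_activity_level(text: str) -> int:
--     """
--     Extract physical activity level (1-5) from persona description.
--     1=sedentary, 2=low, 3=moderate, 4=high, 5=very high
--     """
--     text_lower = text.lower()
--
--     # Very high
--     if any(word in text_lower for word in ['marathons', 'competitive athlete', 'very active',
--                                              'intensive training', 'daily workouts']):
--         return 5
--
--     # High
--     if any(word in text_lower for word in ['exercises regularly', 'fitness', 'gym', 'runs',
--                                              'yoga', 'active lifestyle', 'regular exercise']):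
--         return 4
--
--     # Moderate
--     if any(word in text_lower for word in ['occasional exercise', 'some physical activity',
--                                              'weekend activities', 'tries to stay active']):
--         return 3
--
--     # Low
--     if any(word in text_lower for word in ['limited exercise', 'sedentary job', 'little physical activity',
--                                              'desk job']):
--         return 2
--
--     # Sedentary
--     if any(word in text_lower for word in ['sedentary', 'inactive', 'no exercise', 'very little activity']):
--         return 1
--
--     return 3  # Default moderate
-- ===== SOURCE B (Python) =====
-- KEYWORD_LEVELS = [
--     ("marathons", 5), ("competitive athlete", 5), ("very active", 5),
--     ("intensive training", 5), ("daily workouts", 5),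
--     ("exercises regularly", 4), ("fitness", 4), ("gym", 4), ("runs", 4),
--     ("yoga", 4), ("active lifestyle", 4), ("regular exercise", 4),
--     ("occasional exercise", 3), ("some physical activity", 3),
--     ("weekend activities", 3), ("tries to stay active", 3),
--     ("limited exercise", 2), ("sedentary job", 2),
--     ("little physical activity", 2), ("desk job", 2),
--     ("sedentary", 1), ("inactive", 1), ("no exercise", 1),
--     ("very little activity", 1),
-- ]
--
--
-- def extract_physical_activity_level(text: str) -> int:
--     """Single left-to-right sweep over the text: at each position, record the
--     highest-level keyword starting there in a running-max accumulator."""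
--     t = text.lower()
--     best = 0
--     for i in range(len(t)):
--         for kw, lvl in KEYWORD_LEVELS:
--             if best < lvl and t.startswith(kw, i):
--                 best = lvl
--     return best if best else 3
-- ===== Notes on version B (the rewrite author's own statement) =====
-- stated objective: alternative
-- what changed: Replaced the five keyword-group membership tests with early returns by a single left-to-right sweep over the text positions: at every index a flat (keyword,level) table is checked with startswith and a running-max accumulator keeps the best level seen, defaulting to 3 when it stays 0.
import Mathlib
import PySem

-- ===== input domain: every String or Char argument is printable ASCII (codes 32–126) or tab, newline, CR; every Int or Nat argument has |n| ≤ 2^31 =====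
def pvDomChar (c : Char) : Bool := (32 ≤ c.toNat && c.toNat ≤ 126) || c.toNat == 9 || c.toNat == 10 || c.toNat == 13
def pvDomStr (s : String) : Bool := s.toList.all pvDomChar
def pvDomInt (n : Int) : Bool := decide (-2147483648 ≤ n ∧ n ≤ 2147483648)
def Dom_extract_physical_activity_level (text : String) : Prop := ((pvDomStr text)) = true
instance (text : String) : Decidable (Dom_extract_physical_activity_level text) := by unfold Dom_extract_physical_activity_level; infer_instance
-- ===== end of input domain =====

-- B replaces A's cascade of five any(word in text) group tests by a single left-to-right
-- sweep over the text positions with a flat (keyword, level) table and a running-max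
-- accumulator (alternative decomposition, similar cost).

-- ===== PORT A =====
def extract_physical_activity_level (text : String) : Int :=
  let text_lower := PySem.Str.lower text
  if (["marathons", "competitive athlete", "very active",
       "intensive training", "daily workouts"]).any (fun word => PySem.Str.isIn word text_lower) then 5
  else if (["exercises regularly", "fitness", "gym", "runs",
            "yoga", "active lifestyle", "regular exercise"]).any (fun word => PySem.Str.isIn word text_lower) then 4
  else if (["occasional exercise", "some physical activity",
            "weekend activities", "tries to stay active"]).any (fun word => PySem.Str.isIn word text_lower) then 3
  else if (["limited exercise", "sedentary job", "little physical activity",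
            "desk job"]).any (fun word => PySem.Str.isIn word text_lower) then 2
  else if (["sedentary", "inactive", "no exercise", "very little activity"]).any (fun word => PySem.Str.isIn word text_lower) then 1
  else 3

-- ===== PORT B =====
def pvKeywordLevels : List (String × Int) :=
  [("marathons", 5), ("competitive athlete", 5), ("very active", 5),
   ("intensive training", 5), ("daily workouts", 5),
   ("exercises regularly", 4), ("fitness", 4), ("gym", 4), ("runs", 4),
   ("yoga", 4), ("active lifestyle", 4), ("regular exercise", 4),
   ("occasional exercise", 3), ("some physical activity", 3),
   ("weekend activities", 3), ("tries to stay active", 3),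
   ("limited exercise", 2), ("sedentary job", 2),
   ("little physical activity", 2), ("desk job", 2),
   ("sedentary", 1), ("inactive", 1), ("no exercise", 1),
   ("very little activity", 1)]

-- t.startswith(kw, i) with 0 ≤ i ≤ len(t) is ported by hand, exactly, as
-- PySem.Chars.startswith (t.toList.drop i) kw.toList (the loop only produces such i).
def extract_physical_activity_level_alt (text : String) : Int :=
  let tl := (PySem.Str.lower text).toList
  let best := (List.range tl.length).foldl
    (fun best i => pvKeywordLevels.foldl
      (fun b kl =>
        if decide (b < kl.2) && PySem.Chars.startswith (tl.drop i) kl.1.toList then kl.2 else b)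
      best) 0
  if best ≠ 0 then best else 3

-- ===== PRECONDITION & SPEC =====
def Spec_extract_physical_activity_level (text : String) (out : Int) : Prop := out = extract_physical_activity_level_alt text
instance (text : String) (out : Int) : Decidable (Spec_extract_physical_activity_level text out) := by unfold Spec_extract_physical_activity_level; infer_instance

-- ===== CLAIM (what is proved, stated in full; the proofs are below) =====
def Claim_equal_extract_physical_activity_level : Prop := ∀ (text : String), Dom_extract_physical_activity_level text → Spec_extract_physical_activity_level text (extract_physical_activity_level text)

-- ===== LEMMAS AND PROOFS =====

-- generic facts about the running-max fold, step = if P a && b < g a then g a else b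
theorem pvStep_ge {α : Type} (P : α → Bool) (g : α → Int) (b : Int) (a : α) :
    b ≤ (if P a && decide (b < g a) then g a else b) := by
  split_ifs with h
  · have h2 : b < g a := by simpa using (by simpa using h : P a = true ∧ decide (b < g a) = true).2
    exact le_of_lt h2
  · exact le_refl b

theorem pvF_ge {α : Type} (P : α → Bool) (g : α → Int) :
    ∀ (L : List α) (b : Int),
      b ≤ L.foldl (fun b a => if P a && decide (b < g a) then g a else b) b := by
  intro L
  induction L with
  | nil => intro b; simp
  | cons a L ih =>
      intro b
      simpa [List.foldl_cons] using le_trans (pvStep_ge P g b a) (ih _)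

theorem pvF_ge_match {α : Type} (P : α → Bool) (g : α → Int) :
    ∀ (L : List α) (b : Int) (a : α), a ∈ L → P a = true →
      g a ≤ L.foldl (fun b a => if P a && decide (b < g a) then g a else b) b := by
  intro L
  induction L with
  | nil => intro b a h; simp at h
  | cons x L ih =>
      intro b a hmem hP
      rcases List.mem_cons.mp hmem with rfl | hmem
      · -- matched at the head: after the step the accumulator is ≥ g a
        have hstep : g a ≤ (if P a && decide (b < g a) then g a else b) := by
          by_cases hlt : b < g a
          · simp [hP, hlt]
          · simp [hP, hlt]
            omega
        simpa [List.foldl_cons] using le_trans hstep (pvF_ge P g L _)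
      · simpa [List.foldl_cons] using ih _ a hmem hP

theorem pvF_cases {α : Type} (P : α → Bool) (g : α → Int) :
    ∀ (L : List α) (b : Int),
      L.foldl (fun b a => if P a && decide (b < g a) then g a else b) b = b
      ∨ ∃ a ∈ L, P a = true ∧
          L.foldl (fun b a => if P a && decide (b < g a) then g a else b) b = g a := by
  intro L
  induction L with
  | nil => intro b; left; simp
  | cons x L ih =>
      intro b
      simp only [List.foldl_cons]
      by_cases hfire : (P x && decide (b < g x)) = true
      · rcases ih (if P x && decide (b < g x) then g x else b) with h | ⟨a, hm, hP, hv⟩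
        · right; exact ⟨x, List.mem_cons_self, (by simpa using hfire : P x = true ∧ decide (b < g x) = true).1, by simp [hfire] at h ⊢; exact h⟩
        · right; exact ⟨a, List.mem_cons_of_mem _ hm, hP, hv⟩
      · rcases ih (if P x && decide (b < g x) then g x else b) with h | ⟨a, hm, hP, hv⟩
        · left; simpa [hfire] using h
        · right; exact ⟨a, List.mem_cons_of_mem _ hm, hP, hv⟩

-- flatten a double fold into a fold over the product list
theorem pvFlat {β γ : Type} (h : Int → β × γ → Int) :
    ∀ (xs : List β) (ys : List γ) (b : Int),
      xs.foldl (fun b x => ys.foldl (fun b y => h b (x, y)) b) b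
        = (xs.flatMap (fun x => ys.map (fun y => (x, y)))).foldl h b := by
  intro xs
  induction xs with
  | nil => intro ys b; simp
  | cons x xs ih =>
      intro ys b
      simp [List.foldl_cons, List.flatMap_cons, List.foldl_append, List.foldl_map, ih]

-- facts about the literal table, all by decide
theorem pv_ne : ∀ kl ∈ pvKeywordLevels, kl.1.toList ≠ [] := by decide
theorem pv_le5 : ∀ kl ∈ pvKeywordLevels, kl.2 ≤ 5 := by decide
theorem pv_lv : ∀ kl ∈ pvKeywordLevels,
    kl.2 = 5 ∨ kl.2 = 4 ∨ kl.2 = 3 ∨ kl.2 = 2 ∨ kl.2 = 1 := by decide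
theorem pv_g5 : ∀ kl ∈ pvKeywordLevels, kl.2 = 5 → kl.1 ∈
    ["marathons", "competitive athlete", "very active", "intensive training", "daily workouts"] := by decide
theorem pv_g4 : ∀ kl ∈ pvKeywordLevels, kl.2 = 4 → kl.1 ∈
    ["exercises regularly", "fitness", "gym", "runs", "yoga", "active lifestyle", "regular exercise"] := by decide
theorem pv_g3 : ∀ kl ∈ pvKeywordLevels, kl.2 = 3 → kl.1 ∈
    ["occasional exercise", "some physical activity", "weekend activities", "tries to stay active"] := by decide
theorem pv_g2 : ∀ kl ∈ pvKeywordLevels, kl.2 = 2 → kl.1 ∈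
    ["limited exercise", "sedentary job", "little physical activity", "desk job"] := by decide
theorem pv_g1 : ∀ kl ∈ pvKeywordLevels, kl.2 = 1 → kl.1 ∈
    ["sedentary", "inactive", "no exercise", "very little activity"] := by decide
theorem pv_m5 : ∀ w ∈ (["marathons", "competitive athlete", "very active",
    "intensive training", "daily workouts"] : List String), (w, (5:Int)) ∈ pvKeywordLevels := by decide
theorem pv_m4 : ∀ w ∈ (["exercises regularly", "fitness", "gym", "runs",
    "yoga", "active lifestyle", "regular exercise"] : List String), (w, (4:Int)) ∈ pvKeywordLevels := by decide
theorem pv_m3 : ∀ w ∈ (["occasional exercise", "some physical activity",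
    "weekend activities", "tries to stay active"] : List String), (w, (3:Int)) ∈ pvKeywordLevels := by decide
theorem pv_m2 : ∀ w ∈ (["limited exercise", "sedentary job", "little physical activity",
    "desk job"] : List String), (w, (2:Int)) ∈ pvKeywordLevels := by decide
theorem pv_m1 : ∀ w ∈ (["sedentary", "inactive", "no exercise",
    "very little activity"] : List String), (w, (1:Int)) ∈ pvKeywordLevels := by decide

-- substring ↔ "some position in range matches" (for a nonempty pattern)
theorem pv_isIn_iff (kw : String) (s : String) (hne : kw.toList ≠ []) :
    PySem.Str.isIn kw s = true ↔
      ∃ i < s.toList.length, PySem.Chars.startswith (s.toList.drop i) kw.toList = true := by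
  rw [PySem.Str.isIn_iff_infix, ← PySem.Chars.isIn_iff_infix,
    ← PySem.Chars.exists_prefix_drop_iff_isIn]
  constructor
  · rintro ⟨j, hj⟩
    refine ⟨j, ?_, (PySem.Chars.startswith_iff _ _).mpr hj⟩
    by_contra hge
    rw [not_lt] at hge
    have : s.toList.drop j = [] := List.drop_eq_nil_of_le hge
    rw [this] at hj
    exact hne (List.prefix_nil.mp hj)
  · rintro ⟨i, _, hsw⟩
    exact ⟨i, (PySem.Chars.startswith_iff _ _).mp hsw⟩

theorem pv_agree (text : String) :
    extract_physical_activity_level text = extract_physical_activity_level_alt text := by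
  simp only [extract_physical_activity_level, extract_physical_activity_level_alt]
  set s := PySem.Str.lower text with hs
  set tl := s.toList with htl
  set n := tl.length with hn
  set P : Nat × (String × Int) → Bool :=
    fun a => PySem.Chars.startswith (tl.drop a.1) a.2.1.toList with hP
  set g : Nat × (String × Int) → Int := fun a => a.2.2 with hg
  set pairs := (List.range n).flatMap (fun i => pvKeywordLevels.map (fun kl => (i, kl))) with hpairs
  have hflat :
      (List.range n).foldl
        (fun best i => pvKeywordLevels.foldl
          (fun b kl =>
            if decide (b < kl.2) && PySem.Chars.startswith (tl.drop i) kl.1.toList then kl.2 else b)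
          best) 0
      = pairs.foldl (fun b a => if P a && decide (b < g a) then g a else b) 0 := by
    rw [hpairs]
    rw [← pvFlat (fun b a => if P a && decide (b < g a) then g a else b) (List.range n) pvKeywordLevels 0]
    apply PySem.List.foldl_congr_mem
    intro b i _
    apply PySem.List.foldl_congr_mem
    intro b' kl _
    simp [hP, hg, Bool.and_comm]
  set R := pairs.foldl (fun b a => if P a && decide (b < g a) then g a else b) 0 with hR
  rw [hflat]
  have hmem_pairs : ∀ (i : Nat) (kl : String × Int),
      (i, kl) ∈ pairs ↔ i < n ∧ kl ∈ pvKeywordLevels := by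
    intro i kl
    simp [hpairs, List.mem_flatMap, List.mem_range, List.mem_map]
  -- any listed keyword occurring in s forces its level below R
  have hGe : ∀ (kw : String) (v : Int), (kw, v) ∈ pvKeywordLevels →
      PySem.Str.isIn kw s = true → v ≤ R := by
    intro kw v hmem hin
    obtain ⟨i, hi, hsw⟩ := (pv_isIn_iff kw s (pv_ne _ hmem)).mp hin
    exact pvF_ge_match P g pairs 0 (i, (kw, v))
      ((hmem_pairs i (kw, v)).mpr ⟨hi, hmem⟩) hsw
  -- R is 0 or the level of some listed keyword occurring in s
  have hCase : R = 0 ∨ ∃ kw v, (kw, v) ∈ pvKeywordLevels ∧ PySem.Str.isIn kw s = true ∧ R = v := by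
    rcases pvF_cases P g pairs 0 with h | ⟨⟨i, kw, v⟩, hm, hPa, hv⟩
    · left; exact h
    · right
      have hmem := ((hmem_pairs i (kw, v)).mp hm).2
      refine ⟨kw, v, hmem, ?_, hv⟩
      exact (pv_isIn_iff kw s (pv_ne _ hmem)).mpr ⟨i, ((hmem_pairs i (kw, v)).mp hm).1, hPa⟩
  -- the five group conditions of A
  by_cases c5 : (["marathons", "competitive athlete", "very active",
       "intensive training", "daily workouts"]).any (fun word => PySem.Str.isIn word s) = true
  · obtain ⟨w, hw, hin⟩ := List.any_eq_true.mp c5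
    have h5 : (5:Int) ≤ R := hGe w 5 (pv_m5 w hw) hin
    have hle : R ≤ 5 := by
      rcases hCase with h | ⟨kw, v, hm, _, hv⟩
      · omega
      · have := pv_le5 _ hm; omega
    have h : R = 5 := le_antisymm hle h5
    rw [if_pos c5, h]; norm_num
  · by_cases c4 : (["exercises regularly", "fitness", "gym", "runs",
            "yoga", "active lifestyle", "regular exercise"]).any (fun word => PySem.Str.isIn word s) = true
    · obtain ⟨w, hw, hin⟩ := List.any_eq_true.mp c4
      have h4 : (4:Int) ≤ R := hGe w 4 (pv_m4 w hw) hin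
      have hle : R ≤ 4 := by
        rcases hCase with h | ⟨kw, v, hm, hkin, hv⟩
        · omega
        · have hv5 : v ≠ 5 := by
            intro h5
            exact c5 (List.any_eq_true.mpr ⟨kw, pv_g5 _ hm (by simpa [h5] using rfl), hkin⟩)
          rcases pv_lv _ hm with h | h | h | h | h <;> omega
      have h : R = 4 := le_antisymm hle h4
      rw [if_neg c5, if_pos c4, h]; norm_num
    · by_cases c3 : (["occasional exercise", "some physical activity",
            "weekend activities", "tries to stay active"]).any (fun word => PySem.Str.isIn word s) = true
      · obtain ⟨w, hw, hin⟩ := List.any_eq_true.mp c3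
        have h3 : (3:Int) ≤ R := hGe w 3 (pv_m3 w hw) hin
        have hle : R ≤ 3 := by
          rcases hCase with h | ⟨kw, v, hm, hkin, hv⟩
          · omega
          · have hv5 : v ≠ 5 := fun h5 =>
              c5 (List.any_eq_true.mpr ⟨kw, pv_g5 _ hm (by simpa [h5] using rfl), hkin⟩)
            have hv4 : v ≠ 4 := fun h4 =>
              c4 (List.any_eq_true.mpr ⟨kw, pv_g4 _ hm (by simpa [h4] using rfl), hkin⟩)
            rcases pv_lv _ hm with h | h | h | h | h <;> omega
        have h : R = 3 := le_antisymm hle h3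
        rw [if_neg c5, if_neg c4, if_pos c3, h]; norm_num
      · by_cases c2 : (["limited exercise", "sedentary job", "little physical activity",
            "desk job"]).any (fun word => PySem.Str.isIn word s) = true
        · obtain ⟨w, hw, hin⟩ := List.any_eq_true.mp c2
          have h2 : (2:Int) ≤ R := hGe w 2 (pv_m2 w hw) hin
          have hle : R ≤ 2 := by
            rcases hCase with h | ⟨kw, v, hm, hkin, hv⟩
            · omega
            · have hv5 : v ≠ 5 := fun h5 =>
                c5 (List.any_eq_true.mpr ⟨kw, pv_g5 _ hm (by simpa [h5] using rfl), hkin⟩)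
              have hv4 : v ≠ 4 := fun h4 =>
                c4 (List.any_eq_true.mpr ⟨kw, pv_g4 _ hm (by simpa [h4] using rfl), hkin⟩)
              have hv3 : v ≠ 3 := fun h3 =>
                c3 (List.any_eq_true.mpr ⟨kw, pv_g3 _ hm (by simpa [h3] using rfl), hkin⟩)
              rcases pv_lv _ hm with h | h | h | h | h <;> omega
          have h : R = 2 := le_antisymm hle h2
          rw [if_neg c5, if_neg c4, if_neg c3, if_pos c2, h]; norm_num
        · by_cases c1 : (["sedentary", "inactive", "no exercise",
              "very little activity"]).any (fun word => PySem.Str.isIn word s) = true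
          · obtain ⟨w, hw, hin⟩ := List.any_eq_true.mp c1
            have h1 : (1:Int) ≤ R := hGe w 1 (pv_m1 w hw) hin
            have hle : R ≤ 1 := by
              rcases hCase with h | ⟨kw, v, hm, hkin, hv⟩
              · omega
              · have hv5 : v ≠ 5 := fun h5 =>
                  c5 (List.any_eq_true.mpr ⟨kw, pv_g5 _ hm (by simpa [h5] using rfl), hkin⟩)
                have hv4 : v ≠ 4 := fun h4 =>
                  c4 (List.any_eq_true.mpr ⟨kw, pv_g4 _ hm (by simpa [h4] using rfl), hkin⟩)
                have hv3 : v ≠ 3 := fun h3 =>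
                  c3 (List.any_eq_true.mpr ⟨kw, pv_g3 _ hm (by simpa [h3] using rfl), hkin⟩)
                have hv2 : v ≠ 2 := fun h2 =>
                  c2 (List.any_eq_true.mpr ⟨kw, pv_g2 _ hm (by simpa [h2] using rfl), hkin⟩)
                rcases pv_lv _ hm with h | h | h | h | h <;> omega
            have h : R = 1 := le_antisymm hle h1
            rw [if_neg c5, if_neg c4, if_neg c3, if_neg c2, if_pos c1, h]; norm_num
          · have hR0 : R = 0 := by
              rcases hCase with h | ⟨kw, v, hm, hkin, hv⟩
              · exact h
              · exfalso
                rcases pv_lv _ hm with h | h | h | h | h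
                · exact c5 (List.any_eq_true.mpr ⟨kw, pv_g5 _ hm h, hkin⟩)
                · exact c4 (List.any_eq_true.mpr ⟨kw, pv_g4 _ hm h, hkin⟩)
                · exact c3 (List.any_eq_true.mpr ⟨kw, pv_g3 _ hm h, hkin⟩)
                · exact c2 (List.any_eq_true.mpr ⟨kw, pv_g2 _ hm h, hkin⟩)
                · exact c1 (List.any_eq_true.mpr ⟨kw, pv_g1 _ hm h, hkin⟩)
            rw [if_neg c5, if_neg c4, if_neg c3, if_neg c2, if_neg c1, hR0]; norm_num

-- ===== VERDICT (by name: the statement is the Claim_ definition above) =====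
theorem extract_physical_activity_level_spec : Claim_equal_extract_physical_activity_level := by
  intro text _
  unfold Spec_extract_physical_activity_level
  exact pv_agree text
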